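-- pv_equiv track=rewrite | github.com/ErikZornWallentin/Fun-Challenges | Python/Temperature_Converter/temperature_converter.py | checkIsNumber
-- ===== SOURCE A (Python) =====
-- def checkIsNumber(input):
-- 	periodCounter = 0
-- 	negativeNumber = False
--
-- 	for i in range(len(input)):
-- 		if (input[i] == '-' and i == 0):
-- 			#Do nothing as we will accept negative numbers
-- 			negativeNumber = True
-- 		elif (input[i] == '.'):
-- 			periodCounter = periodCounter + 1
-- 			if (periodCounter > 1):
-- 				print ("Entered input is not a number!\n")
-- 				return 0
-- 		elif (input[i].isdigit() == False):
-- 			print ("Entered input is not a number!\n")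
-- 			return 0
-- 	return 1
-- ===== SOURCE B (Python) =====
-- def checkIsNumber(input):
-- 	body = input[1:] if input[:1] == '-' else input
-- 	parts = body.split('.')
-- 	if len(parts) <= 2 and all(c.isdigit() for part in parts for c in part):
-- 		return 1
-- 	print ("Entered input is not a number!\n")
-- 	return 0
-- ===== Notes on version B (the rewrite author's own statement) =====
-- stated objective: simpler
-- what changed: Replaced A's index-by-index scan with period-counter and position bookkeeping by a strip-optional-leading-sign / split-on-period / all-parts-digits decomposition.
import Mathlib
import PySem

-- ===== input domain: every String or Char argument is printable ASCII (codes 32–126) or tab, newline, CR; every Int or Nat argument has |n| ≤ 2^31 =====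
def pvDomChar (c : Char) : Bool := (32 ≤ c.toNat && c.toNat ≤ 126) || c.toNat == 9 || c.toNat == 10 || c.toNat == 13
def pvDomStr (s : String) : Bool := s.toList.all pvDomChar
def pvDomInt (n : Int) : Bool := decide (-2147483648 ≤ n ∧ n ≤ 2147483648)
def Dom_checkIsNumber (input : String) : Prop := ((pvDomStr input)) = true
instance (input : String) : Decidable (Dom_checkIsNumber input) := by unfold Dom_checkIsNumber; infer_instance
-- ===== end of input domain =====

-- B replaces A's indexed scan with a strip-sign / split-on-period / all-digits decomposition (simpler);
-- equivalence is about the RETURN VALUE; both Pythons also print the same message exactly when 0 is returned.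

-- ===== PORT A =====
-- the `for i in range(len(input))` loop: state = periodCounter, index i; early `return 0` = result 0
def pvLoopA (cs : List Char) (i : Nat) (pc : Nat) : Int :=
  match cs with
  | [] => 1
  | c :: rest =>
    if c == '-' && i == 0 then
      pvLoopA rest (i + 1) pc
    else if c == '.' then
      if pc + 1 > 1 then 0 else pvLoopA rest (i + 1) (pc + 1)
    else if PySem.Chars.isdigit c = false then 0
    else pvLoopA rest (i + 1) pc

def checkIsNumber (input : String) : Int :=
  pvLoopA input.toList 0 0

-- ===== PORT B =====
def checkIsNumber_alt (input : String) : Int :=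
  let l := input.toList
  let body := if PySem.Chars.slice l none (some 1) == ['-'] then PySem.Chars.slice l (some 1) none else l
  let parts := PySem.Chars.splitOn body ['.']
  if parts.length ≤ 2 && parts.all (fun p => p.all PySem.Chars.isdigit) then 1 else 0

-- ===== PRECONDITION & SPEC =====
def Spec_checkIsNumber (input : String) (out : Int) : Prop := out = checkIsNumber_alt input
instance (input : String) (out : Int) : Decidable (Spec_checkIsNumber input out) := by unfold Spec_checkIsNumber; infer_instance

-- ===== CLAIM (what is proved, stated in full; the proofs are below) =====
def Claim_equal_checkIsNumber : Prop := ∀ (input : String), Dom_checkIsNumber input → Spec_checkIsNumber input (checkIsNumber input)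

-- ===== LEMMAS AND PROOFS =====

-- A's loop after position 0: the '-' branch is dead
def pvLoop2 (cs : List Char) (pc : Nat) : Int :=
  match cs with
  | [] => 1
  | c :: rest =>
    if c == '.' then
      if pc + 1 > 1 then 0 else pvLoop2 rest (pc + 1)
    else if PySem.Chars.isdigit c = false then 0
    else pvLoop2 rest pc

theorem pvLoopA_succ (cs : List Char) (i pc : Nat) : pvLoopA cs (i + 1) pc = pvLoop2 cs pc := by
  induction cs generalizing i pc with
  | nil => rfl
  | cons c rest ih =>
    simp only [pvLoopA, pvLoop2, Nat.succ_ne_zero, beq_iff_eq, Bool.and_eq_true, and_false]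
    split_ifs <;> simp_all [ih]

-- characterisation of A's loop
theorem pvLoop2_char (cs : List Char) (pc : Nat) (hpc : pc ≤ 1) :
    pvLoop2 cs pc =
      if (decide (cs.count '.' + pc ≤ 1) && cs.all (fun c => c == '.' || PySem.Chars.isdigit c)) then 1 else 0 := by
  induction cs generalizing pc with
  | nil => simp [pvLoop2, hpc]
  | cons c rest ih =>
    by_cases hdot : c = '.'
    · subst hdot
      by_cases hpc0 : pc = 0
      · subst hpc0
        simp only [pvLoop2, beq_self_eq_true, if_true, gt_iff_lt, Nat.lt_irrefl, if_false,
          ih 1 (by omega), List.count_cons_self, List.all_cons, Bool.true_or, Bool.true_and]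
      · have h1 : pc + 1 > 1 := by omega
        have h2 : ¬ (rest.count '.' + 1 + pc ≤ 1) := by omega
        simp [pvLoop2, h1, List.count_cons, h2]
    · by_cases hdig : PySem.Chars.isdigit c
      · simp [pvLoop2, hdot, hdig, ih pc hpc, List.count_cons]
      · simp [pvLoop2, hdot, hdig]

-- a simple recursive version of split-on-'.' used only in the proof
def pvSp (cs : List Char) : List (List Char) :=
  match cs with
  | [] => [[]]
  | c :: rest => if c = '.' then [] :: pvSp rest else (c :: (pvSp rest).headI) :: (pvSp rest).tail

theorem pv_modifyHead_id {α : Type} (l : List α) : List.modifyHead (fun x => x) l = l := by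
  cases l <;> simp

theorem pvSp_ne_nil (cs : List Char) : pvSp cs ≠ [] := by
  cases cs <;> simp [pvSp] <;> split <;> simp

theorem pvSplitOn_go (cs cur : List Char) (acc : List (List Char)) (fuel : Nat) (h : cs.length < fuel) :
    PySem.Chars.splitOn.go ['.'] fuel cs cur acc =
      acc.reverse ++ (pvSp cs).modifyHead (cur.reverse ++ ·) := by
  induction fuel generalizing cs cur acc with
  | zero => omega
  | succ n ih =>
    cases cs with
    | nil =>
      simp [PySem.Chars.splitOn.go, pvSp]
    | cons c rest =>
      simp only [PySem.Chars.splitOn.go]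
      by_cases hc : c = '.'
      · subst hc
        rw [if_pos (by simp [List.isPrefixOf])]
        have hdrop : List.drop (['.'] : List Char).length ('.' :: rest) = rest := by simp
        rw [hdrop, ih rest [] _ (by simpa using Nat.lt_of_succ_lt_succ h)]
        simp [pvSp, pv_modifyHead_id]
      · rw [if_neg (by simp [List.isPrefixOf]; exact fun h => hc h.symm)]
        rw [ih rest (c :: cur) _ (by simpa using Nat.lt_of_succ_lt_succ h)]
        obtain ⟨p, ps, hps⟩ := List.exists_cons_of_ne_nil (pvSp_ne_nil rest)
        simp [pvSp, hc, hps]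

theorem pvSplitOn_eq_sp (cs : List Char) : PySem.Chars.splitOn cs ['.'] = pvSp cs := by
  unfold PySem.Chars.splitOn
  rw [pvSplitOn_go cs [] [] (cs.length + 1) (by omega)]
  simp [pv_modifyHead_id]

theorem pvSp_length (cs : List Char) : (pvSp cs).length = cs.count '.' + 1 := by
  induction cs with
  | nil => rfl
  | cons c rest ih =>
    by_cases hc : c = '.'
    · subst hc; simp [pvSp, List.count_cons, ih]
    · obtain ⟨p, ps, hps⟩ := List.exists_cons_of_ne_nil (pvSp_ne_nil rest)
      simp [pvSp, hc, hps, List.count_cons]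
      have := ih
      rw [hps] at this
      simpa using this

theorem pvSp_all (cs : List Char) :
    (pvSp cs).all (fun p => p.all PySem.Chars.isdigit) =
      cs.all (fun c => c == '.' || PySem.Chars.isdigit c) := by
  induction cs with
  | nil => rfl
  | cons c rest ih =>
    by_cases hc : c = '.'
    · subst hc; simp [pvSp, ih]
    · obtain ⟨p, ps, hps⟩ := List.exists_cons_of_ne_nil (pvSp_ne_nil rest)
      rw [hps] at ih
      simp only [List.all_cons] at ih
      have hcb : (c == '.') = false := by simp [hc]
      simp only [pvSp, if_neg hc, hps, List.headI, List.tail_cons, List.all_cons, hcb,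
        Bool.false_or, Bool.and_assoc, ih]

-- slices used by B, in list form
theorem pv_slice_take (l : List Char) : PySem.Chars.slice l none (some 1) = l.take 1 := by
  simp [PySem.Chars.slice_eq_listSlice, PySem.List.slice_to]
theorem pv_slice_drop (l : List Char) : PySem.Chars.slice l (some 1) none = l.drop 1 := by
  simp [PySem.Chars.slice_eq_listSlice, PySem.List.slice_from]

-- the two accept-conditions agree on any body list
theorem pvB_cond (b : List Char) :
    (decide ((pvSp b).length ≤ 2) && (pvSp b).all (fun p => p.all PySem.Chars.isdigit)) =
    (decide (b.count '.' + 0 ≤ 1) && b.all (fun c => c == '.' || PySem.Chars.isdigit c)) := by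
  rw [pvSp_length, pvSp_all]
  congr 1
  rw [decide_eq_decide]
  omega

-- common closed form for B, over the '-'-stripped body
theorem pvB_char (input : String) :
    checkIsNumber_alt input =
      (let l := input.toList
       let body := if l.take 1 = ['-'] then l.drop 1 else l
       if (decide (body.count '.' + 0 ≤ 1) && body.all (fun c => c == '.' || PySem.Chars.isdigit c)) then 1 else 0) := by
  unfold checkIsNumber_alt
  simp only [pv_slice_take, pv_slice_drop, beq_iff_eq, pvSplitOn_eq_sp]
  generalize input.toList = l
  rcases eq_or_ne (l.take 1) ['-'] with h | h
  · simp only [if_pos h, pvB_cond]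
  · simp only [if_neg h, pvB_cond]

-- ===== VERDICT (by name: the statement is the Claim_ definition above) =====
theorem checkIsNumber_spec : Claim_equal_checkIsNumber := by
  intro input _
  unfold Spec_checkIsNumber
  rw [pvB_char]
  show pvLoopA input.toList 0 0 = _
  generalize input.toList = l
  cases l with
  | nil => rfl
  | cons c rest =>
    by_cases hc : c = '-'
    · subst hc
      have h1 : pvLoopA ('-' :: rest) 0 0 = pvLoop2 rest 0 := by
        simp only [pvLoopA, beq_self_eq_true, Bool.and_self, if_pos]
        exact pvLoopA_succ rest 0 0
      rw [h1, pvLoop2_char rest 0 (by omega)]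
      simp
    · have hne : (c == '-' && (0 == 0 : Bool)) = false := by simp [hc]
      have htake : (c :: rest).take 1 ≠ ['-'] := by simp [List.take, hc]
      simp only [pvLoopA, hne, Bool.false_eq_true, if_false, if_neg htake]
      by_cases hdot : c = '.'
      · subst hdot
        simp only [beq_self_eq_true, if_true, gt_iff_lt, Nat.lt_irrefl, if_false, Nat.zero_add]
        rw [pvLoopA_succ, pvLoop2_char rest 1 (by omega)]
        simp [List.count_cons]
      · have hdotb : (c == '.') = false := by simp [hdot]
        by_cases hdig : PySem.Chars.isdigit c
        · rw [if_neg (by simp [hdot]), if_neg (by simp [hdig]), pvLoopA_succ,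
            pvLoop2_char rest 0 (by omega)]
          simp [List.count_cons, hdotb, hdig]
        · rw [if_neg (by simp [hdot]), if_pos (by simp [hdig])]
          simp [hdotb, hdig]
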